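-- pv_equiv track=rewrite | github.com/aikikode/adventofcode | 2021/day_09/low_locations.py | extend_basin
-- ===== SOURCE A (Python) =====
-- from typing import List, Set, Tuple
--
-- def get_neighbours(i, j, X, Y):
--     for a, b in [(i + 1, j), (i - 1, j), (i, j + 1), (i, j - 1)]:
--         if not (a < 0 or b < 0 or a >= X or b >= Y):
--             yield a, b
--
-- def extend_basin(x, y: int, height_map: List[List[int]], visited: Set[Tuple[int, int]]) -> Set[Tuple[int, int]]:
--     X, Y = len(height_map), len(height_map[0])
--     visited.add((x, y))
--     basin = {(x, y), }
--     for i, j in get_neighbours(x, y, X, Y):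
--         if (i, j) not in visited and height_map[i][j] > height_map[x][y] and height_map[i][j] != 9:
--             basin |= extend_basin(i, j, height_map, visited)
--     return basin
-- ===== SOURCE B (Python) =====
-- from typing import List, Set, Tuple
--
--
-- def extend_basin(x, y: int, height_map: List[List[int]], visited: Set[Tuple[int, int]]) -> Set[Tuple[int, int]]:
--     X, Y = len(height_map), len(height_map[0])
--
--     def qual_neighbours(i, j):
--         # in-bounds neighbours strictly higher than (i, j) and not a 9-wall
--         return [(a, b) for a, b in ((i + 1, j), (i - 1, j), (i, j + 1), (i, j - 1))
--                 if 0 <= a < X and 0 <= b < Y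
--                 and height_map[a][b] > height_map[i][j] and height_map[a][b] != 9]
--
--     visited.add((x, y))
--     basin = {(x, y)}
--     stack = qual_neighbours(x, y)
--     while stack:
--         c = stack.pop(0)
--         if c in visited:
--             continue
--         visited.add(c)
--         basin.add(c)
--         stack = qual_neighbours(*c) + stack
--     return basin
-- ===== Notes on version B (the rewrite author's own statement) =====
-- stated objective: alternative
-- what changed: The recursive DFS flood-fill (recursion + set-union of sub-basins) is replaced by an iterative flood-fill with an explicit stack and a visited check at pop time; B also mutates `visited` exactly as A does, adding the same cells.
-- outside the precondition, e.g. on extend_basin(0, 0, [[9, 9], [3]], set()): A returns {(0, 0)}, B returns {(0, 0)}; on extend_basin(2, 0, [[1], [2]], {(1, 0)}): A returns {(2, 0)}, B raises IndexError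
import Mathlib
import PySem

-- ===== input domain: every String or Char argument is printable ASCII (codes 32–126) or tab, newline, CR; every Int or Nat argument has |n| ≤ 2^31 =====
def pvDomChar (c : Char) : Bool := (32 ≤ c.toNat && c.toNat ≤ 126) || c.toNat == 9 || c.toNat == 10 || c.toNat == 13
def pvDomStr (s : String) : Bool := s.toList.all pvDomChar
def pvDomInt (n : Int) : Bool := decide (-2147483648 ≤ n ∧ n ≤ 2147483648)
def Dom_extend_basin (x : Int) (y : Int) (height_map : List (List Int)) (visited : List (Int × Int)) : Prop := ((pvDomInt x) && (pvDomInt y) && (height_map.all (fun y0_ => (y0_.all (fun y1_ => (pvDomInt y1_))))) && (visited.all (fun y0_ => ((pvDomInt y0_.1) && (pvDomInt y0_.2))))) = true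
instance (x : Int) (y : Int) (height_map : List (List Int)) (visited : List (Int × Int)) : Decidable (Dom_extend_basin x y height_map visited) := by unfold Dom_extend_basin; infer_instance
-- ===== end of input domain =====

-- B replaces A's recursive DFS flood-fill by an iterative explicit-stack flood-fill (alternative
-- decomposition, same cost). Python A and B both mutate `visited` in place, adding exactly the same
-- cells; the equivalence proved here is about the RETURN value (the basin set, as an
-- insertion-ordered duplicate-free list).

-- ===== PORT A =====
-- height_map[i][j], totalised with a default; exact wherever the Python access succeeds
-- (Pre_ excludes every input on which a Python access raises).
def hmGet (hm : List (List Int)) (i j : Int) : Int :=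
  (PySem.List.pyGet? ((PySem.List.pyGet? hm i).getD []) j).getD 0

-- generator get_neighbours(i, j, X, Y) as the list it yields
def get_neighbours (i j X Y : Int) : List (Int × Int) :=
  [(i + 1, j), (i - 1, j), (i, j + 1), (i, j - 1)].filter
    (fun c => decide (¬ (c.1 < 0 ∨ c.2 < 0 ∨ c.1 ≥ X ∨ c.2 ≥ Y)))

-- the `for i, j in get_neighbours(...)` loop of A; `g` is the recursive call at one fuel less
def ebLoopA (hm : List (List Int))
    (g : Int × Int → List (Int × Int) → (List (Int × Int) × List (Int × Int))) (c : Int × Int) :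
    List (Int × Int) → List (Int × Int) → List (Int × Int) → (List (Int × Int) × List (Int × Int))
  | [], basin, vis => (basin, vis)
  | n :: ns, basin, vis =>
    if n ∉ vis ∧ hmGet hm n.1 n.2 > hmGet hm c.1 c.2 ∧ hmGet hm n.1 n.2 ≠ 9 then
      ebLoopA hm g c ns (PySem.Set.union basin (g n vis).1) (g n vis).2
    else ebLoopA hm g c ns basin vis

-- A's recursion, fuel-guarded for totality (the wrapper supplies ample fuel; the 0-case is never
-- reached from the wrapper).  State: (basin, visited); Python mutates `visited`, we thread it.
def ebGoA (hm : List (List Int)) :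
    Nat → Int × Int → List (Int × Int) → (List (Int × Int) × List (Int × Int))
  | 0, c, vis => ([c], PySem.Set.add vis c)
  | f + 1, c, vis =>
    ebLoopA hm (ebGoA hm f) c
      (get_neighbours c.1 c.2 (hm.length : Int) (((hm.headD []).length : Int)))
      [c] (PySem.Set.add vis c)

def extend_basin (x : Int) (y : Int) (height_map : List (List Int)) (visited : List (Int × Int)) : List (Int × Int) :=
  (ebGoA height_map (height_map.length * (height_map.headD []).length + 3) (x, y) visited).1

-- ===== PORT B =====
-- B's qual_neighbours(i, j): in-bounds neighbours strictly higher than (i, j) and ≠ 9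
def pushQual (hm : List (List Int)) (c : Int × Int) : List (Int × Int) :=
  [(c.1 + 1, c.2), (c.1 - 1, c.2), (c.1, c.2 + 1), (c.1, c.2 - 1)].filter
    (fun n => decide (0 ≤ n.1 ∧ n.1 < (hm.length : Int) ∧ 0 ≤ n.2 ∧ n.2 < ((hm.headD []).length : Int) ∧
      hmGet hm n.1 n.2 > hmGet hm c.1 c.2 ∧ hmGet hm n.1 n.2 ≠ 9))

-- B's while-loop over the explicit stack (head of the list = front of B's stack, which B pops
-- with pop(0) and extends by prepending); fuel-guarded for totality, wrapper supplies ample fuel.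
def ebLoopB (hm : List (List Int)) :
    Nat → List (Int × Int) → List (Int × Int) → List (Int × Int) → List (Int × Int)
  | 0, _, _, basin => basin
  | _ + 1, [], _, basin => basin
  | f + 1, c :: rest, vis, basin =>
    if c ∈ vis then ebLoopB hm f rest vis basin
    else ebLoopB hm f (pushQual hm c ++ rest) (PySem.Set.add vis c) (PySem.Set.add basin c)

def extend_basin_alt (x : Int) (y : Int) (height_map : List (List Int)) (visited : List (Int × Int)) : List (Int × Int) :=
  ebLoopB height_map (5 * (height_map.length * (height_map.headD []).length) + 5)
    (pushQual height_map (x, y)) (PySem.Set.add visited (x, y)) [(x, y)]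

-- ===== PRECONDITION & SPEC =====
-- Pre_ excludes exactly the inputs on which a Python subscript raises (empty map: IndexError on
-- height_map[0]; a start index that is probed — i.e. has an in-bounds neighbour — but is out of
-- Python's index range; ragged maps, where the fill can run into a row shorter than the first).
-- It thereby also excludes two kinds of inputs on which A happens to return (see claim cites):
-- ragged maps whose short rows are never probed, and out-of-range starts whose in-bounds
-- neighbours are all already visited (A's `not in visited` short-circuits the raising access
-- while B's neighbour scan performs it) — both outside the function's natural domain.
def Pre_extend_basin (x : Int) (y : Int) (height_map : List (List Int)) (visited : List (Int × Int)) : Prop :=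
  height_map ≠ [] ∧
  ((∃ n ∈ [(x + 1, y), (x - 1, y), (x, y + 1), (x, y - 1)],
      0 ≤ n.1 ∧ n.1 < (height_map.length : Int) ∧ 0 ≤ n.2 ∧ n.2 < ((height_map.headD []).length : Int)) →
    ((∀ r ∈ height_map, (height_map.headD []).length ≤ r.length) ∧
     -(height_map.length : Int) ≤ x ∧ x < (height_map.length : Int) ∧
     -(((PySem.List.pyGet? height_map x).getD []).length : Int) ≤ y ∧
     y < (((PySem.List.pyGet? height_map x).getD []).length : Int)))
instance (x : Int) (y : Int) (height_map : List (List Int)) (visited : List (Int × Int)) : Decidable (Pre_extend_basin x y height_map visited) := by unfold Pre_extend_basin; infer_instance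

def pvWitness_extend_basin : Int × Int × List (List Int) × (List (Int × Int)) :=
  (0, 0, [[1, 2], [9, 9]], [])

def Spec_extend_basin (x : Int) (y : Int) (height_map : List (List Int)) (visited : List (Int × Int)) (out : List (Int × Int)) : Prop := out = extend_basin_alt x y height_map visited
instance (x : Int) (y : Int) (height_map : List (List Int)) (visited : List (Int × Int)) (out : List (Int × Int)) : Decidable (Spec_extend_basin x y height_map visited out) := by unfold Spec_extend_basin; infer_instance

-- ===== CLAIM (what is proved, stated in full; the proofs are below) =====
def Claim_equal_extend_basin : Prop := ∀ (x : Int) (y : Int) (height_map : List (List Int)) (visited : List (Int × Int)), Dom_extend_basin x y height_map visited → Pre_extend_basin x y height_map visited → Spec_extend_basin x y height_map visited (extend_basin x y height_map visited)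

-- ===== LEMMAS AND PROOFS =====

-- `visList g s b vis`: process the pending cells `s` in order; a cell already visited is skipped,
-- otherwise `g` (one recursive A-call) is run on it and its basin is unioned in.  Both ports are
-- reduced to this shape.
def visList (g : Int × Int → List (Int × Int) → (List (Int × Int) × List (Int × Int))) :
    List (Int × Int) → List (Int × Int) → List (Int × Int) → (List (Int × Int) × List (Int × Int))
  | [], basin, vis => (basin, vis)
  | n :: ns, basin, vis =>
    if n ∈ vis then visList g ns basin vis
    else visList g ns (PySem.Set.union basin (g n vis).1) (g n vis).2

theorem pv_union_eq_update (s t : List (Int × Int)) :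
    PySem.Set.union s t = PySem.Set.update s t := rfl

theorem pv_union_append (b t : List (Int × Int)) (h1 : t.Nodup) (h2 : ∀ x ∈ t, x ∉ b) :
    PySem.Set.union b t = b ++ t := by
  rw [pv_union_eq_update]; exact PySem.Set.update_eq_append_of_disjoint b t h1 h2

-- A's loop over in-bounds neighbours with the combined test  =  visList over the pre-filtered list

theorem pv_mem_add_self (s : List (Int × Int)) (x : Int × Int) : x ∈ PySem.Set.add s x := by
  by_cases h : x ∈ s
  · rw [PySem.Set.add_of_mem h]; exact h
  · rw [PySem.Set.add_of_not_mem h]; simp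

theorem pv_mem_add_of_mem {s : List (Int × Int)} {a : Int × Int} (h : a ∈ s) (x : Int × Int) :
    a ∈ PySem.Set.add s x := by
  by_cases hx : x ∈ s
  · rw [PySem.Set.add_of_mem hx]; exact h
  · rw [PySem.Set.add_of_not_mem hx]; exact List.mem_append.mpr (Or.inl h)

theorem loopA_eq_visList (hm : List (List Int))
    (g : Int × Int → List (Int × Int) → (List (Int × Int) × List (Int × Int))) (c : Int × Int) :
    ∀ (ns b vis : List (Int × Int)),
      ebLoopA hm g c ns b vis =
        visList g (ns.filter (fun n => decide (hmGet hm n.1 n.2 > hmGet hm c.1 c.2 ∧ hmGet hm n.1 n.2 ≠ 9))) b vis := by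
  intro ns
  induction ns with
  | nil => intro b vis; simp [ebLoopA, visList]
  | cons n ns ih =>
    intro b vis
    by_cases hq : hmGet hm n.1 n.2 > hmGet hm c.1 c.2 ∧ hmGet hm n.1 n.2 ≠ 9
    · by_cases hv : n ∈ vis
      · simp [ebLoopA, visList, hv, hq, ih]
      · simp [ebLoopA, visList, hv, hq, ih]
    · simp [ebLoopA, visList, hq, ih]

theorem get_neighbours_filter (hm : List (List Int)) (c : Int × Int) :
    (get_neighbours c.1 c.2 (hm.length : Int) (((hm.headD []).length : Int))).filter
        (fun n => decide (hmGet hm n.1 n.2 > hmGet hm c.1 c.2 ∧ hmGet hm n.1 n.2 ≠ 9)) =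
      pushQual hm c := by
  unfold get_neighbours pushQual
  rw [List.filter_filter]
  apply List.filter_congr
  intro a _
  rw [Bool.eq_iff_iff]
  simp only [Bool.and_eq_true, decide_eq_true_eq]
  constructor
  · rintro ⟨hq, hb⟩
    push_neg at hb
    exact ⟨by omega, by omega, by omega, by omega, hq.1, hq.2⟩
  · rintro ⟨h1, h2, h3, h4, h5, h6⟩
    refine ⟨⟨h5, h6⟩, ?_⟩
    push_neg
    exact ⟨by omega, by omega, by omega, by omega⟩

theorem goA_succ (hm : List (List Int)) (f : Nat) (c : Int × Int) (vis : List (Int × Int)) :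
    ebGoA hm (f + 1) c vis = visList (ebGoA hm f) (pushQual hm c) [c] (PySem.Set.add vis c) := by
  show ebLoopA hm (ebGoA hm f) c _ [c] (PySem.Set.add vis c) = _
  rw [loopA_eq_visList, get_neighbours_filter]

theorem visList_append (g : Int × Int → List (Int × Int) → (List (Int × Int) × List (Int × Int))) :
    ∀ (s t b vis : List (Int × Int)),
      visList g (s ++ t) b vis = visList g t (visList g s b vis).1 (visList g s b vis).2 := by
  intro s
  induction s with
  | nil => intro t b vis; simp [visList]
  | cons n ns ih =>
    intro t b vis
    by_cases hv : n ∈ vis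
    · simp [visList, hv, ih]
    · simp [visList, hv, ih]

-- The key invariant: processing a pending list from state (b, vis) with b ⊆ vis appends one block
-- Δ of fresh, duplicate-free cells to BOTH components, and Δ does not depend on b.
theorem key (g : Int × Int → List (Int × Int) → (List (Int × Int) × List (Int × Int)))
    (hg : ∀ n vis, ∃ Δ, g n vis = (n :: Δ, PySem.Set.add vis n ++ Δ) ∧ Δ.Nodup ∧
          ∀ a ∈ Δ, a ∉ PySem.Set.add vis n) :
    ∀ (s vis : List (Int × Int)), ∃ Δ : List (Int × Int), Δ.Nodup ∧ (∀ a ∈ Δ, a ∉ vis) ∧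
      ∀ b, (∀ a ∈ b, a ∈ vis) → visList g s b vis = (b ++ Δ, vis ++ Δ) := by
  intro s
  induction s with
  | nil =>
    intro vis
    exact ⟨[], by simp, by simp, fun b _ => by simp [visList]⟩
  | cons n ns ih =>
    intro vis
    by_cases hv : n ∈ vis
    · obtain ⟨Δ, h1, h2, h3⟩ := ih vis
      exact ⟨Δ, h1, h2, fun b hb => by simpa [visList, hv] using h3 b hb⟩
    · obtain ⟨Δ0, hg1, hg2, hg3⟩ := hg n vis
      have hadd : PySem.Set.add vis n = vis ++ [n] := PySem.Set.add_of_not_mem hv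
      have hnΔ0 : n ∉ Δ0 := fun h => hg3 n h (by rw [hadd]; simp)
      have hΔ0vis : ∀ a ∈ Δ0, a ∉ vis := fun a ha hav => hg3 a ha (by rw [hadd]; simp [hav])
      obtain ⟨Δ1, k1, k2, k3⟩ := ih (vis ++ n :: Δ0)
      refine ⟨(n :: Δ0) ++ Δ1, ?_, ?_, ?_⟩
      · refine List.Nodup.append (by simp [hnΔ0, hg2]) k1 ?_
        intro a ha hΔ1
        exact k2 a hΔ1 (List.mem_append.mpr (Or.inr ha))
      · intro a ha
        rcases List.mem_append.mp ha with h | h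
        · rcases List.mem_cons.mp h with rfl | h'
          · exact hv
          · exact hΔ0vis a h'
        · intro hav; exact k2 a h (by simp [List.mem_append, hav])
      · intro b hb
        have hgn : g n vis = (n :: Δ0, vis ++ n :: Δ0) := by
          rw [hg1, hadd]; simp
        have hun : PySem.Set.union b (n :: Δ0) = b ++ n :: Δ0 := by
          apply pv_union_append
          · simp [hnΔ0, hg2]
          · intro x hx
            rcases List.mem_cons.mp hx with rfl | h'
            · exact fun hxb => hv (hb x hxb)
            · exact fun hxb => hΔ0vis x h' (hb x hxb)
        have hstep : visList g (n :: ns) b vis =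
            visList g ns (b ++ n :: Δ0) (vis ++ n :: Δ0) := by
          simp [visList, hv, hgn, hun]
        rw [hstep, k3 (b ++ n :: Δ0) (by
          intro a ha
          rcases List.mem_append.mp ha with h | h
          · exact List.mem_append.mpr (Or.inl (hb a h))
          · exact List.mem_append.mpr (Or.inr h))]
        simp

theorem inv_goA (hm : List (List Int)) :
    ∀ (f : Nat) (c : Int × Int) (vis : List (Int × Int)), ∃ Δ,
      ebGoA hm f c vis = (c :: Δ, PySem.Set.add vis c ++ Δ) ∧ Δ.Nodup ∧
      ∀ a ∈ Δ, a ∉ PySem.Set.add vis c := by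
  intro f
  induction f with
  | zero =>
    intro c vis
    exact ⟨[], by simp [ebGoA], by simp, by simp⟩
  | succ f ih =>
    intro c vis
    obtain ⟨Δ, h1, h2, h3⟩ := key (ebGoA hm f) ih (pushQual hm c) (PySem.Set.add vis c)
    refine ⟨Δ, ?_, h1, h2⟩
    rw [goA_succ]
    have := h3 [c] (by
      intro a ha
      rcases List.mem_singleton.mp ha with rfl
      exact pv_mem_add_self _ _)
    rw [this]
    simp

-- ===== the potential μ = number of unvisited grid cells =====
def pvInGrid (hm : List (List Int)) (n : Int × Int) : Prop :=
  0 ≤ n.1 ∧ n.1 < (hm.length : Int) ∧ 0 ≤ n.2 ∧ n.2 < ((hm.headD []).length : Int)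

def pvMu (hm : List (List Int)) (vis : List (Int × Int)) : Nat :=
  ((Finset.range hm.length ×ˢ Finset.range (hm.headD []).length).filter
    (fun p => ((p.1 : Int), (p.2 : Int)) ∉ vis)).card

theorem pvMu_mono (hm : List (List Int)) {vis vis' : List (Int × Int)} (h : vis ⊆ vis') :
    pvMu hm vis' ≤ pvMu hm vis := by
  apply Finset.card_le_card
  intro p hp
  simp only [Finset.mem_filter] at hp ⊢
  exact ⟨hp.1, fun hmem => hp.2 (h hmem)⟩

theorem pvMu_append (hm : List (List Int)) {vis : List (Int × Int)} {c : Int × Int}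
    (hc : pvInGrid hm c) (hv : c ∉ vis) :
    pvMu hm (vis ++ [c]) + 1 = pvMu hm vis := by
  obtain ⟨h1, h2, h3, h4⟩ := hc
  have hcast : (((c.1.toNat : Nat) : Int), ((c.2.toNat : Nat) : Int)) = c := by
    rw [Int.toNat_of_nonneg h1, Int.toNat_of_nonneg h3]
  have hmem : (c.1.toNat, c.2.toNat) ∈
      (Finset.range hm.length ×ˢ Finset.range (hm.headD []).length).filter
        (fun p => ((p.1 : Int), (p.2 : Int)) ∉ vis) := by
    simp only [Finset.mem_filter, Finset.mem_product, Finset.mem_range]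
    refine ⟨⟨by omega, by omega⟩, ?_⟩
    rw [hcast]
    exact hv
  have hsplit : (Finset.range hm.length ×ˢ Finset.range (hm.headD []).length).filter
        (fun p => ((p.1 : Int), (p.2 : Int)) ∉ vis ++ [c]) =
      ((Finset.range hm.length ×ˢ Finset.range (hm.headD []).length).filter
        (fun p => ((p.1 : Int), (p.2 : Int)) ∉ vis)).erase (c.1.toNat, c.2.toNat) := by
    ext p
    simp only [Finset.mem_filter, Finset.mem_erase, Finset.mem_product, Finset.mem_range,
      List.mem_append, List.mem_singleton]
    constructor
    · rintro ⟨hp, hnp⟩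
      push_neg at hnp
      refine ⟨?_, hp, hnp.1⟩
      intro hpe
      apply hnp.2
      rw [hpe] at *
      exact hcast
    · rintro ⟨hne, hp, hnv⟩
      refine ⟨hp, ?_⟩
      push_neg
      refine ⟨hnv, ?_⟩
      intro heq
      apply hne
      have e1 : ((p.1 : Nat) : Int) = c.1 := congrArg Prod.fst heq
      have e2 : ((p.2 : Nat) : Int) = c.2 := congrArg Prod.snd heq
      have : p.1 = c.1.toNat := by omega
      have : p.2 = c.2.toNat := by omega
      ext <;> simp <;> omega
  rw [pvMu, pvMu, hsplit, Finset.card_erase_of_mem hmem]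
  have hpos : 0 < ((Finset.range hm.length ×ˢ Finset.range (hm.headD []).length).filter
      (fun p => ((p.1 : Int), (p.2 : Int)) ∉ vis)).card := Finset.card_pos.mpr ⟨_, hmem⟩
  omega

theorem pvMu_le (hm : List (List Int)) (vis : List (Int × Int)) :
    pvMu hm vis ≤ hm.length * (hm.headD []).length := by
  calc pvMu hm vis ≤ (Finset.range hm.length ×ˢ Finset.range (hm.headD []).length).card :=
        Finset.card_filter_le _ _
    _ = hm.length * (hm.headD []).length := by rw [Finset.card_product, Finset.card_range, Finset.card_range]

theorem pushQual_subset_grid (hm : List (List Int)) (c : Int × Int) :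
    ∀ n ∈ pushQual hm c, pvInGrid hm n := by
  intro n hn
  simp only [pushQual, List.mem_filter, decide_eq_true_eq] at hn
  exact ⟨hn.2.1, hn.2.2.1, hn.2.2.2.1, hn.2.2.2.2.1⟩

theorem pushQual_length_le (hm : List (List Int)) (c : Int × Int) :
    (pushQual hm c).length ≤ 4 :=
  le_trans (List.length_filter_le _ _) (by simp)

-- ===== fuel-irrelevance: with enough fuel, A's recursion does not depend on the exact amount =====
theorem fi_goA (hm : List (List Int)) :
    ∀ (k f1 f2 : Nat) (c : Int × Int) (vis : List (Int × Int)),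
      pvMu hm (PySem.Set.add vis c) < k →
      pvMu hm (PySem.Set.add vis c) + 2 ≤ f1 → pvMu hm (PySem.Set.add vis c) + 2 ≤ f2 →
      ebGoA hm f1 c vis = ebGoA hm f2 c vis := by
  intro k
  induction k with
  | zero => intro f1 f2 c vis hk _ _; exact absurd hk (Nat.not_lt_zero _)
  | succ k ih =>
    intro f1 f2 c vis hk h1 h2
    obtain ⟨f1', rfl⟩ : ∃ m, f1 = m + 1 := ⟨f1 - 1, by omega⟩
    obtain ⟨f2', rfl⟩ : ∃ m, f2 = m + 1 := ⟨f2 - 1, by omega⟩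
    rw [goA_succ, goA_succ]
    have H : ∀ (s b vis' : List (Int × Int)), (∀ n ∈ s, pvInGrid hm n) →
        PySem.Set.add vis c ⊆ vis' →
        visList (ebGoA hm f1') s b vis' = visList (ebGoA hm f2') s b vis' := by
      intro s
      induction s with
      | nil => intro b vis' _ _; simp [visList]
      | cons n ns ihs =>
        intro b vis' hs hsub
        by_cases hv : n ∈ vis'
        · simp only [visList, if_pos hv]
          exact ihs b vis' (fun m hm' => hs m (List.mem_cons_of_mem _ hm')) hsub
        · have hg : pvInGrid hm n := hs n List.mem_cons_self
          have hμ' : pvMu hm vis' ≤ pvMu hm (PySem.Set.add vis c) := pvMu_mono hm hsub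
          have hadd : PySem.Set.add vis' n = vis' ++ [n] := PySem.Set.add_of_not_mem hv
          have hdec : pvMu hm (PySem.Set.add vis' n) + 1 = pvMu hm vis' := by
            rw [hadd]; exact pvMu_append hm hg hv
          have heq : ebGoA hm f1' n vis' = ebGoA hm f2' n vis' :=
            ih f1' f2' n vis' (by omega) (by omega) (by omega)
          simp only [visList, if_neg hv, heq]
          obtain ⟨Δ, hΔ, _, _⟩ := inv_goA hm f2' n vis'
          apply ihs
          · exact fun m hm' => hs m (List.mem_cons_of_mem _ hm')
          · rw [hΔ]
            intro a ha
            have : a ∈ vis' := hsub ha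
            exact List.mem_append.mpr (Or.inl (pv_mem_add_of_mem this n))
    exact H _ _ _ (pushQual_subset_grid hm c) (fun a ha => ha)

theorem fi_list (hm : List (List Int)) :
    ∀ (s b vis : List (Int × Int)) (f1 f2 : Nat), (∀ n ∈ s, pvInGrid hm n) →
      pvMu hm vis + 2 ≤ f1 → pvMu hm vis + 2 ≤ f2 →
      visList (ebGoA hm f1) s b vis = visList (ebGoA hm f2) s b vis := by
  intro s
  induction s with
  | nil => intro b vis f1 f2 _ _ _; simp [visList]
  | cons n ns ih =>
    intro b vis f1 f2 hs h1 h2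
    by_cases hv : n ∈ vis
    · simp only [visList, if_pos hv]
      exact ih b vis f1 f2 (fun m hm' => hs m (List.mem_cons_of_mem _ hm')) h1 h2
    · have hg : pvInGrid hm n := hs n List.mem_cons_self
      have hadd : PySem.Set.add vis n = vis ++ [n] := PySem.Set.add_of_not_mem hv
      have hdec : pvMu hm (PySem.Set.add vis n) + 1 = pvMu hm vis := by
        rw [hadd]; exact pvMu_append hm hg hv
      have heq : ebGoA hm f1 n vis = ebGoA hm f2 n vis :=
        fi_goA hm (pvMu hm (PySem.Set.add vis n) + 1) f1 f2 n vis (by omega) (by omega) (by omega)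
      simp only [visList, if_neg hv, heq]
      obtain ⟨Δ, hΔ, _, _⟩ := inv_goA hm f2 n vis
      have hsub2 : pvMu hm (ebGoA hm f2 n vis).2 ≤ pvMu hm (PySem.Set.add vis n) := by
        rw [hΔ]
        exact pvMu_mono hm (List.subset_append_left _ _)
      exact ih _ _ f1 f2 (fun m hm' => hs m (List.mem_cons_of_mem _ hm')) (by omega) (by omega)

-- ===== the main correspondence: B's stack loop = visList over A's recursion =====
theorem main_corr (hm : List (List Int)) :
    ∀ (fB fA : Nat) (s vis b : List (Int × Int)), (∀ n ∈ s, pvInGrid hm n) →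
      (∀ a ∈ b, a ∈ vis) →
      5 * pvMu hm vis + s.length + 1 ≤ fB → pvMu hm vis + 2 ≤ fA →
      ebLoopB hm fB s vis b = (visList (ebGoA hm fA) s b vis).1 := by
  intro fB
  induction fB with
  | zero => intro fA s vis b _ _ hfB _; omega
  | succ fB ih =>
    intro fA s vis b hs hb hfB hfA
    match s with
    | [] => simp [ebLoopB, visList]
    | c :: rest =>
      by_cases hv : c ∈ vis
      · have hlhs : ebLoopB hm (fB + 1) (c :: rest) vis b = ebLoopB hm fB rest vis b := by
          simp [ebLoopB, hv]
        rw [hlhs, ih fA rest vis b (fun m hm' => hs m (List.mem_cons_of_mem _ hm')) hb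
          (by simp at hfB ⊢; omega) hfA]
        simp [visList, hv]
      · have hcg : pvInGrid hm c := hs c List.mem_cons_self
        have hcb : c ∉ b := fun h => hv (hb c h)
        have haddv : PySem.Set.add vis c = vis ++ [c] := PySem.Set.add_of_not_mem hv
        have haddb : PySem.Set.add b c = b ++ [c] := PySem.Set.add_of_not_mem hcb
        have hdec : pvMu hm (vis ++ [c]) + 1 = pvMu hm vis := pvMu_append hm hcg hv
        obtain ⟨fA', rfl⟩ : ∃ m, fA = m + 1 := ⟨fA - 1, by omega⟩
        have hlhs : ebLoopB hm (fB + 1) (c :: rest) vis b =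
            ebLoopB hm fB (pushQual hm c ++ rest) (vis ++ [c]) (b ++ [c]) := by
          simp [ebLoopB, hv, haddv, haddb]
        rw [hlhs]
        rw [ih fA' (pushQual hm c ++ rest) (vis ++ [c]) (b ++ [c])
          (by
            intro n hn
            rcases List.mem_append.mp hn with h | h
            · exact pushQual_subset_grid hm c n h
            · exact hs n (List.mem_cons_of_mem _ h))
          (by
            intro a ha
            rcases List.mem_append.mp ha with h | h
            · exact List.mem_append.mpr (Or.inl (hb a h))
            · exact List.mem_append.mpr (Or.inr h))
          (by
            have h4 := pushQual_length_le hm c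
            simp at hfB ⊢
            omega)
          (by omega)]
        rw [visList_append]
        obtain ⟨Δ, hΔn, hΔv, hΔ⟩ := key (ebGoA hm fA') (inv_goA hm fA') (pushQual hm c) (vis ++ [c])
        have hP := hΔ (b ++ [c]) (by
          intro a ha
          rcases List.mem_append.mp ha with h | h
          · exact List.mem_append.mpr (Or.inl (hb a h))
          · exact List.mem_append.mpr (Or.inr h))
        have hQ := hΔ [c] (by simp)
        have hgo : ebGoA hm (fA' + 1) c vis = (c :: Δ, (vis ++ [c]) ++ Δ) := by
          rw [goA_succ, haddv, hQ]
          simp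
        have hcΔ : c ∉ Δ := fun h => hΔv c h (by simp)
        have hun : PySem.Set.union b (c :: Δ) = b ++ c :: Δ := by
          apply pv_union_append
          · simp [hcΔ, hΔn]
          · intro x hx
            rcases List.mem_cons.mp hx with rfl | h'
            · exact hcb
            · exact fun hxb => hΔv x h' (List.mem_append.mpr (Or.inl (hb x hxb)))
        have hrhs : visList (ebGoA hm (fA' + 1)) (c :: rest) b vis =
            visList (ebGoA hm (fA' + 1)) rest (b ++ c :: Δ) ((vis ++ [c]) ++ Δ) := by
          simp [visList, hv, hgo, hun]
        rw [hP]
        dsimp only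
        rw [hrhs]
        have hlists : b ++ [c] ++ Δ = b ++ c :: Δ := by simp
        rw [hlists]
        have hfin : visList (ebGoA hm fA') rest (b ++ c :: Δ) (vis ++ [c] ++ Δ) =
            visList (ebGoA hm (fA' + 1)) rest (b ++ c :: Δ) (vis ++ [c] ++ Δ) := by
          apply fi_list
          · exact fun m hm' => hs m (List.mem_cons_of_mem _ hm')
          · have : pvMu hm (vis ++ [c] ++ Δ) ≤ pvMu hm (vis ++ [c]) :=
              pvMu_mono hm (List.subset_append_left _ _)
            omega
          · have : pvMu hm (vis ++ [c] ++ Δ) ≤ pvMu hm (vis ++ [c]) :=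
              pvMu_mono hm (List.subset_append_left _ _)
            omega
        rw [hfin]

-- ===== VERDICT (by name: the statement is the Claim_ definition above) =====
theorem extend_basin_spec : Claim_equal_extend_basin := by
  unfold Claim_equal_extend_basin
  intro x y hm vis _ _
  unfold Spec_extend_basin extend_basin extend_basin_alt
  have hμ : pvMu hm (PySem.Set.add vis (x, y)) ≤ hm.length * (hm.headD []).length :=
    pvMu_le hm (PySem.Set.add vis (x, y))
  have h4 := pushQual_length_le hm (x, y)
  have hstep : ebGoA hm (hm.length * (hm.headD []).length + 3) (x, y) vis =
      visList (ebGoA hm (hm.length * (hm.headD []).length + 2)) (pushQual hm (x, y)) [(x, y)]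
        (PySem.Set.add vis (x, y)) := goA_succ hm _ (x, y) vis
  rw [hstep]
  rw [main_corr hm (5 * (hm.length * (hm.headD []).length) + 5)
    (hm.length * (hm.headD []).length + 2) (pushQual hm (x, y)) (PySem.Set.add vis (x, y)) [(x, y)]
    (pushQual_subset_grid hm (x, y))
    (by
      intro a ha
      rcases List.mem_singleton.mp ha with rfl
      exact pv_mem_add_self _ _)
    (by omega) (by omega)]
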